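-- pv_equiv track=rewrite | github.com/SGhosh-007/HackWithInfy2019 | Collision_Course.py | rightchk
-- ===== SOURCE A (Python) =====
-- def rightchk(r,pos,m):
--     c=0
--     if max(r)<m[pos]:
--         c=len(r)
--     else:
--         while len(r)>0 and min(r)<m[pos]:
--             c+=1
--             r.remove(max(r))
--     return c
-- ===== SOURCE B (Python) =====
-- def rightchk(r, pos, m):
--     # Return-value equivalent of A (A also mutates r in place in its else branch; B does not).
--     return len(r) if min(r) < m[pos] else 0
-- ===== Notes on version B (the rewrite author's own statement) =====
-- stated objective: faster
-- what changed: Replaced the quadratic remove-the-max loop (whose count is always either len(r) or 0) by a single min scan and a comparison.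
import Mathlib
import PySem

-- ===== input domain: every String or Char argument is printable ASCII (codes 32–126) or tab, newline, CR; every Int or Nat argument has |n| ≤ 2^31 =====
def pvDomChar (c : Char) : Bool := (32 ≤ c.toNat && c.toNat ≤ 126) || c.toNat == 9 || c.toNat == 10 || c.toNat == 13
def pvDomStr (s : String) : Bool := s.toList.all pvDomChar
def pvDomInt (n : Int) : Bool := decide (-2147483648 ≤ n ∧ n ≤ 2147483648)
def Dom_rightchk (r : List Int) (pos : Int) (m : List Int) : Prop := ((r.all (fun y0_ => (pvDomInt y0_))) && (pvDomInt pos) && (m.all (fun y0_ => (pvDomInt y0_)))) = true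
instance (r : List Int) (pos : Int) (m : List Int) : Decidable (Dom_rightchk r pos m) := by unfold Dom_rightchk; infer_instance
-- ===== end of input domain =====

-- B replaces A's quadratic remove-the-max loop by a single min scan (faster in a timing run);
-- equivalence is about the RETURN value only: A mutates r in place in its else branch, B does not.

-- ===== PORT A =====
-- the while loop: each iteration removes one occurrence of max(r); fuel = r.length suffices exactly
def pvLoopA : Nat → List Int → Int → Int → Int
  | 0, _, _, c => c
  | Nat.succ fuel, r, t, c =>
    if 0 < r.length then
      match PySem.List.min? r (fun x => x) with
      | none => c
      | some mn =>
        if mn < t then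
          match PySem.List.max? r (fun x => x) with
          | none => c
          | some mx =>
            match PySem.List.remove? r mx with
            | none => c
            | some r' => pvLoopA fuel r' t (c + 1)
        else c
    else c

def rightchk (r : List Int) (pos : Int) (m : List Int) : Int :=
  let c : Int := 0
  match PySem.List.max? r (fun x => x), PySem.List.pyGet? m pos with
  | some mx, some t => if mx < t then (r.length : Int) else pvLoopA r.length r t c
  | _, _ => c   -- unreachable under Pre_ (max([]) / m[pos] raise)

-- ===== PORT B =====
def rightchk_alt (r : List Int) (pos : Int) (m : List Int) : Int :=
  match PySem.List.pyGet? m pos with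
  | none => 0   -- unreachable under Pre_
  | some t =>
    match PySem.List.min? r (fun x => x) with
    | none => 0   -- unreachable under Pre_
    | some mn => if mn < t then (r.length : Int) else 0

-- ===== PRECONDITION & SPEC =====
-- A raises ValueError on r = [] (max of empty) and IndexError when pos is out of range of m.
def Pre_rightchk (r : List Int) (pos : Int) (m : List Int) : Prop :=
  r ≠ [] ∧ PySem.Raise.InRange m.length pos
instance (r : List Int) (pos : Int) (m : List Int) : Decidable (Pre_rightchk r pos m) := by
  unfold Pre_rightchk; infer_instance
def pvWitness_rightchk : List Int × Int × List Int := ([3, 1, 4], 0, [2])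

def Spec_rightchk (r : List Int) (pos : Int) (m : List Int) (out : Int) : Prop := out = rightchk_alt r pos m
instance (r : List Int) (pos : Int) (m : List Int) (out : Int) : Decidable (Spec_rightchk r pos m out) := by unfold Spec_rightchk; infer_instance

-- ===== CLAIM (what is proved, stated in full; the proofs are below) =====
def Claim_equal_rightchk : Prop := ∀ (r : List Int) (pos : Int) (m : List Int), Dom_rightchk r pos m → Pre_rightchk r pos m → Spec_rightchk r pos m (rightchk r pos m)

-- ===== LEMMAS AND PROOFS =====

-- the minimum value of a nonempty list is determined: min? returns it
theorem min?_eq_of_isMin {r : List Int} {mn : Int}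
    (hmem : mn ∈ r) (hmin : ∀ y ∈ r, mn ≤ y) :
    PySem.List.min? r (fun x => x) = some mn := by
  cases h : PySem.List.min? r (fun x => x) with
  | none =>
      rw [PySem.List.min?_eq_none_iff] at h
      simp [h] at hmem
  | some m' =>
      have hm' := PySem.List.min?_mem h
      have h1 : m' ≤ mn := PySem.List.min?_isMin h mn hmem
      have h2 : mn ≤ m' := hmin m' hm'
      have : m' = mn := le_antisymm h1 h2
      rw [this]

-- removing one occurrence of the max from a list with ≥ 2 elements keeps the min
theorem min?_erase_max {r : List Int} {mn mx : Int}
    (hmn : PySem.List.min? r (fun x => x) = some mn)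
    (hmx : PySem.List.max? r (fun x => x) = some mx)
    (hne : r.erase mx ≠ []) :
    PySem.List.min? (r.erase mx) (fun x => x) = some mn := by
  have hsub : ∀ y ∈ r.erase mx, y ∈ r := fun y hy => List.mem_of_mem_erase hy
  have hminAll : ∀ y ∈ r.erase mx, mn ≤ y :=
    fun y hy => PySem.List.min?_isMin hmn y (hsub y hy)
  have hmemErase : mn ∈ r.erase mx := by
    by_cases hEq : mn = mx
    · -- all elements equal mn; any element of the nonempty erase witnesses membership
      obtain ⟨z, hz⟩ := List.exists_mem_of_ne_nil _ hne
      have hzr : z ∈ r := hsub z hz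
      have h1 : mn ≤ z := PySem.List.min?_isMin hmn z hzr
      have h2 : z ≤ mx := PySem.List.max?_isMax hmx z hzr
      have : z = mn := by omega
      simpa [this] using hz
    · exact List.mem_erase_of_ne hEq |>.mpr (PySem.List.min?_mem hmn)
  exact min?_eq_of_isMin hmemErase hminAll

-- the loop with fuel = r.length counts every element when min(r) < t
theorem pvLoopA_lt : ∀ (n : Nat) (r : List Int) (t c mn : Int),
    r.length = n → PySem.List.min? r (fun x => x) = some mn → mn < t →
    pvLoopA n r t c = c + n := by
  intro n
  induction n with
  | zero =>
      intro r t c mn hlen hmn _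
      have : r = [] := List.eq_nil_of_length_eq_zero hlen
      subst this
      have := PySem.List.min?_mem hmn
      simp at this
  | succ k ih =>
      intro r t c mn hlen hmn hlt
      have hpos : 0 < r.length := by omega
      have hne : r ≠ [] := by
        intro h; subst h; simp at hpos
      obtain ⟨mx, hmx⟩ : ∃ mx, PySem.List.max? r (fun x => x) = some mx := by
        cases h : PySem.List.max? r (fun x => x) with
        | none => rw [PySem.List.max?_eq_none_iff] at h; exact absurd h hne
        | some mx => exact ⟨mx, rfl⟩
      have hmxMem : mx ∈ r := PySem.List.max?_mem hmx
      have hrem : PySem.List.remove? r mx = some (r.erase mx) :=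
        PySem.List.remove?_eq_some_erase r mx hmxMem
      have hlen' : (r.erase mx).length = k := by
        have := List.length_erase_of_mem hmxMem
        omega
      rw [pvLoopA]
      simp only [hpos, if_pos, hmn, hlt, if_pos, hmx, hrem]
      by_cases hk : k = 0
      · subst hk
        have : r.erase mx = [] := List.eq_nil_of_length_eq_zero hlen'
        rw [this]
        simp [pvLoopA]
      · have hne' : r.erase mx ≠ [] := by
          intro h; rw [h] at hlen'; simp at hlen'; omega
        have hmn' := min?_erase_max hmn hmx hne'
        rw [ih (r.erase mx) t (c + 1) mn hlen' hmn' hlt]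
        push_cast
        ring

-- ===== VERDICT (by name: the statement is the Claim_ definition above) =====
theorem rightchk_spec : Claim_equal_rightchk := by
  intro r pos m _ hpre
  obtain ⟨hne, hin⟩ := hpre
  unfold Spec_rightchk rightchk rightchk_alt
  obtain ⟨mx, hmx⟩ : ∃ mx, PySem.List.max? r (fun x => x) = some mx := by
    cases h : PySem.List.max? r (fun x => x) with
    | none => rw [PySem.List.max?_eq_none_iff] at h; exact absurd h hne
    | some mx => exact ⟨mx, rfl⟩
  obtain ⟨mn, hmn⟩ : ∃ mn, PySem.List.min? r (fun x => x) = some mn := by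
    cases h : PySem.List.min? r (fun x => x) with
    | none => rw [PySem.List.min?_eq_none_iff] at h; exact absurd h hne
    | some mn => exact ⟨mn, rfl⟩
  obtain ⟨t, ht⟩ : ∃ t, PySem.List.pyGet? m pos = some t := by
    cases h : PySem.List.pyGet? m pos with
    | none => rw [PySem.List.pyGet?_eq_none_iff] at h; exact absurd hin h
    | some t => exact ⟨t, rfl⟩
  have hmnMem := PySem.List.min?_mem hmn
  have hle : mn ≤ mx := PySem.List.max?_isMax hmx mn hmnMem
  rw [hmx, hmn, ht]
  show (if mx < t then (r.length : Int) else pvLoopA r.length r t 0)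
      = (if mn < t then (r.length : Int) else 0)
  by_cases hmxlt : mx < t
  · have : mn < t := by omega
    simp [hmxlt, this]
  · rw [if_neg hmxlt]
    by_cases hmnlt : mn < t
    · rw [if_pos hmnlt]
      exact pvLoopA_lt r.length r t 0 mn rfl hmn hmnlt |>.trans (by omega)
    · rw [if_neg hmnlt]
      have hpos : 0 < r.length := List.length_pos_of_ne_nil hne
      obtain ⟨k, hk⟩ : ∃ k, r.length = k + 1 := ⟨r.length - 1, by omega⟩
      rw [hk]
      simp [pvLoopA, hmn, hmnlt]
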